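-- pv_equiv track=rewrite | github.com/YoujinKang/Algorithm | 프로그래머스/lv2/60057. 문자열 압축/문자열 압축.py | solution
-- ===== SOURCE A (Python) =====
-- def solution(s):
--     answer = len(s)
--     # 1개 단위부터 압축 단위를 len(s)//2 까지 늘려가며 확인
--     for step in range(1, len(s) // 2 + 1):
--         compressed = ""
--         prev = s[0:step]  # 앞에서부터 step까지의 문자열
--         cnt = 1
--         # step 크기만큼 증가시키며 이전 문자열 prev와 비교
--         for j in range(step, len(s), step):
--             if prev == s[j:j + step]:  # 확인하는 문자열이 prev와 같다면,
--                 cnt += 1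
--             else:  # 다른 문자열이 나왔다면
--                 prev_str = "".join(prev)
--                 compressed += str(cnt) + prev_str if cnt > 1 else prev_str
--                 prev = s[j:j + step]  # prev 업데이트
--                 cnt = 1
--         # 남은 문자열 처리
--         prev_str = "".join(prev)
--         compressed += str(cnt) + prev_str if cnt > 1 else prev_str
--         answer = min(answer, len(compressed))
--     return answer
-- ===== SOURCE B (Python) =====
-- def solution(s):
--     n = len(s)
--     best = n
--     for p in range(1, n // 2 + 1):
--         # prefix sums of character mismatches at distance p:
--         # mis[j] = number of positions t in [p, j) with s[t] != s[t-p],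
--         # so consecutive full blocks at j-p and j are equal iff mis[j+p] == mis[j]
--         mis = [0] * (n + 1)
--         for t in range(p, n):
--             mis[t + 1] = mis[t] + (1 if s[t] != s[t - p] else 0)
--         total = 0
--         cnt = 1
--         for j in range(p, n, p):
--             if n - j >= p and mis[j + p] == mis[j]:
--                 cnt += 1
--             else:
--                 total += p + (len(str(cnt)) if cnt > 1 else 0)
--                 cnt = 1
--         r = n % p
--         total += (r if r else p) + (len(str(cnt)) if cnt > 1 else 0)
--         best = min(best, total)
--     return best
-- ===== Notes on version B (the rewrite author's own statement) =====
-- stated objective: alternative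
-- what changed: B replaces A's string-slice comparisons and compressed-string concatenation by, per block size p, a precomputed prefix-sum array of character mismatches at distance p so that block equality is an O(1) arithmetic window test (mis[j+p]==mis[j]), and it accumulates only run lengths and digit counts, never building a compressed string.
import Mathlib
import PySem

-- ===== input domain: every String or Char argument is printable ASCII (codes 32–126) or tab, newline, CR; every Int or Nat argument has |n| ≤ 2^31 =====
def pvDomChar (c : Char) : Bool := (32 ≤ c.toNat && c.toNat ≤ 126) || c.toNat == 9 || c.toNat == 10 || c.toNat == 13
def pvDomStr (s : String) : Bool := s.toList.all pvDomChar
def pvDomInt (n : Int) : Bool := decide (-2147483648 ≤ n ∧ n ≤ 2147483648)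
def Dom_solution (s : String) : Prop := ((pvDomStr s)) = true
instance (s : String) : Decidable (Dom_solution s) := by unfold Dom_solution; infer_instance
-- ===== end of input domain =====

-- B replaces A's slice comparisons and compressed-string building with, per block size p, a
-- prefix-sum array of character mismatches at distance p (block equality = one arithmetic
-- window test) and accumulates only run lengths and digit counts; objective: alternative.

-- ===== PORT A =====
-- literal transliteration of A: for each step, fold over range(step, len(s), step)
-- with state (compressed, prev, cnt), building the compressed string, then min of lengths.
def solution (s : String) : Int :=
  let cs := s.toList
  let n : Int := (cs.length : Int)
  (PySem.List.pyRange 1 (PySem.Int.floordiv n 2 + 1) 1).foldl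
    (fun answer step =>
      let st := (PySem.List.pyRange step n step).foldl
        (fun (acc : List Char × List Char × Int) j =>
          if acc.2.1 = PySem.List.slice cs (some j) (some (j + step)) then
            (acc.1, acc.2.1, acc.2.2 + 1)
          else
            (acc.1 ++ (if acc.2.2 > 1 then PySem.Int.toChars acc.2.2 ++ acc.2.1 else acc.2.1),
             PySem.List.slice cs (some j) (some (j + step)), (1 : Int)))
        (([] : List Char), PySem.List.slice cs (some 0) (some step), (1 : Int))
      min answer (((st.1 ++ (if st.2.2 > 1 then PySem.Int.toChars st.2.2 ++ st.2.1 else st.2.1)).length : Int)))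
    n

-- ===== PORT B =====
-- Source B's `for t in range(p, n): mis[t+1] = mis[t] + (1 if s[t] != s[t-p] else 0)` over the
-- preallocated list [0]*(n+1); all reads/writes are in range, so getD's default is never used.
def misBuild (cs : List Char) (p : Nat) : Nat → Nat → List Int → List Int
  | 0, _, m => m          -- fuel 0 never reached: fuel starts at len(s)+1
  | fuel + 1, t, m =>
    if t < cs.length then
      misBuild cs p fuel (t + 1)
        (m.set (t + 1) (m.getD t 0 + (if cs.getD t ' ' ≠ cs.getD (t - p) ' ' then 1 else 0)))
    else m

-- Source B's `for j in range(p, n, p)` loop with state (total, cnt); the block at j equals the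
-- block at j-p iff it is full (n-j >= p) and the mismatch window is empty (mis[j+p]==mis[j]).
def loopB (cs : List Char) (p : Nat) (mis : List Int) : Nat → Nat → Int × Int → Int × Int
  | 0, _, tc => tc        -- fuel 0 never reached: fuel starts at len(s)+1 and j advances by p ≥ 1
  | fuel + 1, j, tc =>
    if j < cs.length then
      if p ≤ cs.length - j ∧ mis.getD (j + p) 0 = mis.getD j 0 then
        loopB cs p mis fuel (j + p) (tc.1, tc.2 + 1)
      else
        loopB cs p mis fuel (j + p)
          (tc.1 + ((p : Int) + (if tc.2 > 1 then ((PySem.Int.toChars tc.2).length : Int) else 0)), 1)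
    else tc

def solution_alt (s : String) : Int :=
  let cs := s.toList
  let n := cs.length
  (PySem.List.pyRange 1 (PySem.Int.floordiv (n : Int) 2 + 1) 1).foldl
    (fun best step =>
      if 0 < step.toNat then
        let p := step.toNat
        let mis := misBuild cs p (n + 1) p (List.replicate (n + 1) 0)
        let tc := loopB cs p mis (n + 1) p (0, 1)
        let r := n % p
        let total := tc.1 + (((if r ≠ 0 then r else p) : Nat) : Int)
          + (if tc.2 > 1 then ((PySem.Int.toChars tc.2).length : Int) else 0)
        min best total
      else best)  -- unreachable guard for totality: every step drawn from range(1, …) is ≥ 1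
    (n : Int)

-- ===== PRECONDITION & SPEC =====
def Spec_solution (s : String) (out : Int) : Prop := out = solution_alt s
instance (s : String) (out : Int) : Decidable (Spec_solution s out) := by unfold Spec_solution; infer_instance

-- ===== CLAIM (what is proved, stated in full; the proofs are below) =====
def Claim_equal_solution : Prop := ∀ (s : String), Dom_solution s → Spec_solution s (solution s)

-- ===== LEMMAS AND PROOFS =====

-- A's inner fold function, over the list of blocks
def gA (acc : List Char × List Char × Int) (b : List Char) : List Char × List Char × Int :=
  if acc.2.1 = b then
    (acc.1, acc.2.1, acc.2.2 + 1)
  else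
    (acc.1 ++ (if acc.2.2 > 1 then PySem.Int.toChars acc.2.2 ++ acc.2.1 else acc.2.1), b, (1 : Int))

-- length contributed by one run (block `b` repeated `c` times)
def emitLen (b : List Char) (c : Int) : Int :=
  (if c > 1 then ((PySem.Int.toChars c).length : Int) else 0) + (b.length : Int)

-- compressed length of a block list, with an open run (prev, c) in progress
def rleLen (prev : List Char) (c : Int) : List (List Char) → Int
  | [] => emitLen prev c
  | b :: bs => if prev = b then rleLen prev (c + 1) bs else emitLen prev c + rleLen b 1 bs

def rleLen0 : List (List Char) → Int
  | [] => 0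
  | b :: bs => rleLen b 1 bs

-- the list of step-sized blocks of cs starting at index i
def chunksFrom (cs : List Char) (step : Nat) (hst : 0 < step) (i : Nat) : List (List Char) :=
  if i < cs.length then
    PySem.List.slice cs (some (i : Int)) (some ((i : Int) + (step : Int))) :: chunksFrom cs step hst (i + step)
  else []
termination_by cs.length - i
decreasing_by omega

theorem rleLen0_cons (b : List Char) (bs : List (List Char)) : rleLen0 (b :: bs) = rleLen b 1 bs := rfl

theorem pyRange_cons_of_pos {a b s : Int} (hs : 0 < s) (hab : a < b) :
    PySem.List.pyRange a b s = a :: PySem.List.pyRange (a + s) b s := by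
  rw [PySem.List.pyRange_of_pos a b hs, PySem.List.pyRange_of_pos (a+s) b hs]
  have hcnt : ((b - a + s - 1) / s).toNat = (if a + s < b then ((b - (a+s) + s - 1) / s).toNat else 0) + 1 := by
    by_cases h : a + s < b
    · simp only [h, if_true]
      have : b - a + s - 1 = (b - (a+s) + s - 1) + 1 * s := by ring
      rw [this, Int.add_mul_ediv_right _ _ (by omega : s ≠ 0)]
      have h0 : 0 ≤ (b - (a+s) + s - 1) / s := Int.ediv_nonneg (by omega) (by omega)
      omega
    · simp only [h, if_false]
      have e1 : b - a + s - 1 = (b - a - 1) + 1 * s := by ring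
      have e2 : (b - a - 1) / s = 0 := Int.ediv_eq_zero_of_lt (by omega) (by omega)
      rw [e1, Int.add_mul_ediv_right _ _ (by omega : s ≠ 0), e2]
      omega
  rw [if_pos hab, hcnt, List.range_succ_eq_map]
  simp only [List.map_cons, List.map_map, Nat.cast_zero, mul_zero, add_zero]
  congr 1
  apply List.map_congr_left
  intro k _
  simp only [Function.comp_apply, Nat.cast_succ]
  ring

theorem map_pyRange_chunks (cs : List Char) (step : Nat) (hst : 0 < step) (i : Nat) :
    (PySem.List.pyRange (i : Int) (cs.length : Int) (step : Int)).map
      (fun j => PySem.List.slice cs (some j) (some (j + (step : Int)))) = chunksFrom cs step hst i := by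
  fun_induction chunksFrom cs step hst i with
  | case1 i h ih =>
    rw [pyRange_cons_of_pos (by exact_mod_cast hst) (by exact_mod_cast h)]
    simp only [List.map_cons]
    rw [show ((i : Int) + (step : Int)) = ((i + step : Nat) : Int) by push_cast; ring] at *
    rw [ih]
  | case2 i h =>
    rw [PySem.List.pyRange_of_pos _ _ (by exact_mod_cast hst), if_neg (by exact_mod_cast h)]
    simp

theorem foldA_len (bs : List (List Char)) : ∀ (acc prev : List Char) (c : Int),
    (((bs.foldl gA (acc, prev, c)).1 ++
      (if (bs.foldl gA (acc, prev, c)).2.2 > 1 then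
        PySem.Int.toChars (bs.foldl gA (acc, prev, c)).2.2 ++ (bs.foldl gA (acc, prev, c)).2.1
       else (bs.foldl gA (acc, prev, c)).2.1)).length : Int)
    = (acc.length : Int) + rleLen prev c bs := by
  induction bs with
  | nil =>
    intro acc prev c
    simp only [List.foldl_nil, rleLen, emitLen, List.length_append]
    split_ifs <;> first
      | (simp only [List.length_append]; push_cast; ring)
      | (push_cast; ring)
  | cons b bs ih =>
    intro acc prev c
    simp only [List.foldl_cons, rleLen]
    by_cases hpb : prev = b
    · rw [if_pos hpb]
      have : gA (acc, prev, c) b = (acc, prev, c + 1) := by simp [gA, hpb]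
      rw [this, ih]
    · rw [if_neg hpb]
      have : gA (acc, prev, c) b =
          (acc ++ (if c > 1 then PySem.Int.toChars c ++ prev else prev), b, (1 : Int)) := by
        simp [gA, hpb]
      rw [this, ih]
      simp only [emitLen, List.length_append]
      split_ifs <;> first
      | (simp only [List.length_append]; push_cast; ring)
      | (push_cast; ring)

-- number of positions t in [p, j) with cs[t] != cs[t-p]  (what mis[j] holds in Source B)
def mismatchCnt (cs : List Char) (p : Nat) (j : Nat) : Int :=
  (((List.range j).countP (fun t => decide (p ≤ t ∧ cs.getD t ' ' ≠ cs.getD (t - p) ' '))) : Int)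

theorem mismatchCnt_succ (cs : List Char) (p t : Nat) (hpt : p ≤ t) :
    mismatchCnt cs p (t + 1)
      = mismatchCnt cs p t + (if cs.getD t ' ' ≠ cs.getD (t - p) ' ' then 1 else 0) := by
  unfold mismatchCnt
  rw [List.range_succ, List.countP_append, List.countP_cons, List.countP_nil]
  by_cases h : cs.getD t ' ' ≠ cs.getD (t - p) ' '
  · have hd : decide (p ≤ t ∧ cs.getD t ' ' ≠ cs.getD (t - p) ' ') = true := by
      rw [decide_eq_true_eq]; exact ⟨hpt, h⟩
    rw [if_pos h, hd]
    push_cast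
    simp
  · have hd : decide (p ≤ t ∧ cs.getD t ' ' ≠ cs.getD (t - p) ' ') = false := by
      rw [decide_eq_false_iff_not]; tauto
    rw [if_neg h, hd]
    push_cast
    simp

theorem mismatchCnt_le (cs : List Char) (p j : Nat) (hj : j ≤ p) : mismatchCnt cs p j = 0 := by
  unfold mismatchCnt
  have : (List.range j).countP (fun t => decide (p ≤ t ∧ cs.getD t ' ' ≠ cs.getD (t - p) ' ')) = 0 := by
    apply List.countP_eq_zero.mpr
    intro t ht
    rw [List.mem_range] at ht
    simp only [decide_eq_true_eq]
    intro hc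
    omega
  rw [this]
  simp

-- mis[j+p] - mis[j] counts the mismatches inside the window [j, j+p)
theorem mismatchCnt_window (cs : List Char) (p j : Nat) (hpj : p ≤ j) :
    mismatchCnt cs p (j + p) = mismatchCnt cs p j
      + (((List.range p).countP (fun k => decide (cs.getD (j + k) ' ' ≠ cs.getD (j + k - p) ' '))) : Int) := by
  unfold mismatchCnt
  rw [List.range_add, List.countP_append, List.countP_map]
  have : (List.range p).countP
      ((fun t => decide (p ≤ t ∧ cs.getD t ' ' ≠ cs.getD (t - p) ' ')) ∘ (fun k => j + k))
      = (List.range p).countP (fun k => decide (cs.getD (j + k) ' ' ≠ cs.getD (j + k - p) ' ')) := by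
    apply List.countP_congr
    intro k _
    simp only [Function.comp_apply, decide_eq_true_eq]
    constructor
    · intro h; exact h.2
    · intro h; exact ⟨by omega, h⟩
  rw [this]
  push_cast
  ring

-- block equality as an arithmetic window test (the heart of B)
theorem window_eq_iff (cs : List Char) (p j : Nat) (hp : 0 < p) (hpj : p ≤ j) (hjn : j < cs.length) :
    ((cs.drop (j - p)).take p = (cs.drop j).take p)
      ↔ (p ≤ cs.length - j ∧ mismatchCnt cs p (j + p) = mismatchCnt cs p j) := by
  have hw := mismatchCnt_window cs p j hpj
  have hlen1 : ((cs.drop (j - p)).take p).length = p := by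
    simp only [List.length_take, List.length_drop]
    omega
  have hcnt0 : (mismatchCnt cs p (j + p) = mismatchCnt cs p j)
      ↔ (∀ k, k < p → cs.getD (j + k) ' ' = cs.getD (j + k - p) ' ') := by
    rw [hw]
    constructor
    · intro h k hk
      have hc : (List.range p).countP (fun k => decide (cs.getD (j + k) ' ' ≠ cs.getD (j + k - p) ' ')) = 0 := by
        omega
      have := List.countP_eq_zero.mp hc k (List.mem_range.mpr hk)
      simp only [decide_eq_true_eq] at this
      tauto
    · intro h
      have hc : (List.range p).countP (fun k => decide (cs.getD (j + k) ' ' ≠ cs.getD (j + k - p) ' ')) = 0 := by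
        apply List.countP_eq_zero.mpr
        intro k hk
        rw [List.mem_range] at hk
        simp only [decide_eq_true_eq]
        intro hne
        exact hne (h k hk)
      rw [hc]
      simp
  have hgd : ∀ i, i < cs.length → cs.getD i ' ' = cs[i]?.getD ' ' := by
    intro i hi
    rw [List.getD_eq_getElem?_getD]
  constructor
  · intro heq
    have hlen2 : ((cs.drop j).take p).length = p := by rw [← heq]; exact hlen1
    have hple : p ≤ cs.length - j := by
      simp only [List.length_take, List.length_drop] at hlen2
      omega
    refine ⟨hple, hcnt0.mpr ?_⟩
    intro k hk
    have hg := congrArg (fun l : List Char => l[k]?.getD ' ') heq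
    simp only [List.getElem?_take_of_lt hk, List.getElem?_drop] at hg
    rw [hgd (j + k) (by omega), hgd (j + k - p) (by omega), show j + k - p = (j - p) + k by omega]
    exact hg.symm
  · rintro ⟨hple, hcnt⟩
    have hpw := hcnt0.mp hcnt
    have hlen2 : ((cs.drop j).take p).length = p := by
      simp only [List.length_take, List.length_drop]
      omega
    apply List.ext_getElem?
    intro k
    by_cases hk : k < p
    · rw [List.getElem?_take_of_lt hk, List.getElem?_take_of_lt hk, List.getElem?_drop, List.getElem?_drop]
      have := hpw k hk
      rw [hgd (j + k) (by omega), hgd (j + k - p) (by omega), show j + k - p = (j - p) + k by omega] at this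
      have h1 : (j - p) + k < cs.length := by omega
      have h2 : j + k < cs.length := by omega
      rw [List.getElem?_eq_getElem h1, List.getElem?_eq_getElem h2] at this ⊢
      simp only [Option.getD_some] at this
      rw [this]
    · rw [List.getElem?_eq_none (by rw [hlen1]; omega), List.getElem?_eq_none (by rw [hlen2]; omega)]

-- the mis list built by misBuild holds exactly mismatchCnt at every index ≤ n
theorem misBuild_getD (cs : List Char) (p : Nat) :
    ∀ (fuel t : Nat) (m : List Int), cs.length < t + fuel → p ≤ t → m.length = cs.length + 1 →
      (∀ i, m.getD i 0 = if i ≤ t then mismatchCnt cs p i else 0) →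
      ∀ i, i ≤ cs.length → (misBuild cs p fuel t m).getD i 0 = mismatchCnt cs p i := by
  intro fuel
  induction fuel with
  | zero =>
    intro t m hfuel hpt hlen hinv i hi
    simp only [misBuild]
    rw [hinv i, if_pos (by omega)]
  | succ fuel ih =>
    intro t m hfuel hpt hlen hinv i hi
    simp only [misBuild]
    by_cases h : t < cs.length
    · rw [if_pos h]
      apply ih (t + 1) _ (by omega) (by omega) (by rw [List.length_set]; exact hlen)
      · intro i'
        rw [List.getD_eq_getElem?_getD, List.getElem?_set]
        by_cases hi' : i' = t + 1
        · subst hi'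
          rw [if_pos rfl, if_pos (by omega)]
          simp only [Option.getD_some]
          rw [hinv t, if_pos (le_refl t), mismatchCnt_succ cs p t hpt,
            if_pos (le_refl (t + 1))]
        · rw [if_neg (by omega : ¬ t + 1 = i')]
          rw [← List.getD_eq_getElem?_getD, hinv i']
          by_cases hle : i' ≤ t
          · rw [if_pos hle, if_pos (by omega)]
          · rw [if_neg hle, if_neg (by omega)]
      · exact hi
    · rw [if_neg h]
      rw [hinv i, if_pos (by omega)]

-- Source B's run loop, terminal case: the pending run is the final (possibly short) block run
theorem loopB_rle_term (cs : List Char) (p : Nat) (hp : 0 < p) (mis : List Int)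
    (fuel j : Nat) (tc : Int × Int) (h : ¬ j < cs.length) (hpj : p ≤ j) (hdvd : p ∣ j)
    (hjp : j - p < cs.length) :
    (loopB cs p mis fuel j tc).1
      + (((if cs.length % p ≠ 0 then cs.length % p else p) : Nat) : Int)
      + (if (loopB cs p mis fuel j tc).2 > 1 then ((PySem.Int.toChars (loopB cs p mis fuel j tc).2).length : Int) else 0)
    = tc.1 + rleLen (PySem.List.slice cs (some ((j - p : Nat) : Int)) (some (((j - p : Nat) : Int) + (p : Int)))) tc.2
        (chunksFrom cs p hp j) := by
  have hstop : loopB cs p mis fuel j tc = tc := by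
    cases fuel with
    | zero => rfl
    | succ fuel => simp only [loopB, if_neg h]
  rw [hstop, chunksFrom, if_neg h]
  simp only [rleLen, emitLen]
  rw [PySem.List.slice_natCast_add]
  have hlast : (((if cs.length % p ≠ 0 then cs.length % p else p) : Nat) : Int)
      = (((cs.drop (j - p)).take p).length : Int) := by
    obtain ⟨q', hq'⟩ : p ∣ (j - p) := Nat.dvd_sub hdvd (dvd_refl p)
    have hmod : cs.length % p = (cs.length - (j - p)) % p := by
      have e : cs.length = (cs.length - (j - p)) + p * q' := by omega
      conv_lhs => rw [e]
      rw [Nat.add_mul_mod_self_left]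
    have hr1 : 0 < cs.length - (j - p) := by omega
    have hr2 : cs.length - (j - p) ≤ p := by omega
    simp only [List.length_take, List.length_drop]
    by_cases hrp : cs.length - (j - p) = p
    · rw [hmod, hrp, Nat.mod_self]
      simp
    · have hlt : (cs.length - (j - p)) % p = cs.length - (j - p) := Nat.mod_eq_of_lt (by omega)
      rw [hmod, hlt, if_pos (by omega)]
      congr 1
      omega
  rw [hlast]
  ring

-- Source B's run loop computes exactly the open-run RLE length of the remaining chunks
theorem loopB_rle (cs : List Char) (p : Nat) (hp : 0 < p) (mis : List Int)
    (hmis : ∀ i, i ≤ cs.length → mis.getD i 0 = mismatchCnt cs p i) :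
    ∀ (fuel j : Nat) (tc : Int × Int), cs.length < j + fuel → p ≤ j → p ∣ j → j - p < cs.length →
      (loopB cs p mis fuel j tc).1
        + (((if cs.length % p ≠ 0 then cs.length % p else p) : Nat) : Int)
        + (if (loopB cs p mis fuel j tc).2 > 1 then ((PySem.Int.toChars (loopB cs p mis fuel j tc).2).length : Int) else 0)
      = tc.1 + rleLen (PySem.List.slice cs (some ((j - p : Nat) : Int)) (some (((j - p : Nat) : Int) + (p : Int)))) tc.2
          (chunksFrom cs p hp j) := by
  intro fuel
  induction fuel with
  | zero =>
    intro j tc hfuel hpj hdvd hjp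
    exact loopB_rle_term cs p hp mis 0 j tc (by omega) hpj hdvd hjp
  | succ fuel ih =>
    intro j tc hfuel hpj hdvd hjp
    by_cases h : j < cs.length
    · simp only [loopB]
      rw [chunksFrom, if_pos h, if_pos h]
      have hCiff : (p ≤ cs.length - j ∧ mis.getD (j + p) 0 = mis.getD j 0)
          ↔ (PySem.List.slice cs (some ((j - p : Nat) : Int)) (some (((j - p : Nat) : Int) + (p : Int)))
             = PySem.List.slice cs (some (j : Int)) (some ((j : Int) + (p : Int)))) := by
        rw [PySem.List.slice_natCast_add, PySem.List.slice_natCast_add]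
        constructor
        · rintro ⟨h1, h2⟩
          rw [hmis (j + p) (by omega), hmis j (by omega)] at h2
          exact (window_eq_iff cs p j hp hpj h).mpr ⟨h1, h2⟩
        · intro heq
          have := (window_eq_iff cs p j hp hpj h).mp heq
          refine ⟨this.1, ?_⟩
          rw [hmis (j + p) (by omega), hmis j (by omega)]
          exact this.2
      by_cases hC : p ≤ cs.length - j ∧ mis.getD (j + p) 0 = mis.getD j 0
      · rw [if_pos hC]
        have heq := hCiff.mp hC
        rw [rleLen, if_pos heq, heq]
        have := ih (j + p) (tc.1, tc.2 + 1) (by omega) (by omega) (Dvd.dvd.add hdvd (dvd_refl p)) (by omega)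
        rw [show j + p - p = j by omega] at this
        rw [this]
      · rw [if_neg hC]
        have hne := (not_iff_not.mpr hCiff).mp hC
        rw [rleLen, if_neg hne]
        have := ih (j + p)
          (tc.1 + ((p : Int) + (if tc.2 > 1 then ((PySem.Int.toChars tc.2).length : Int) else 0)), 1)
          (by omega) (by omega) (Dvd.dvd.add hdvd (dvd_refl p)) (by omega)
        rw [show j + p - p = j by omega] at this
        rw [this]
        simp only [emitLen]
        have hprevlen : ((PySem.List.slice cs (some ((j - p : Nat) : Int))
            (some (((j - p : Nat) : Int) + (p : Int)))).length : Int) = (p : Int) := by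
          rw [PySem.List.slice_natCast_add]
          simp only [List.length_take, List.length_drop]
          have : min p (cs.length - (j - p)) = p := by omega
          rw [this]
        rw [hprevlen]
        ring
    · exact loopB_rle_term cs p hp mis (fuel + 1) j tc h hpj hdvd hjp

-- A's per-step compressed length equals the RLE length of the chunk list
theorem stepA_val (cs : List Char) (k : Nat) (hk0 : 0 < k) (h0 : 0 < cs.length) :
    ((((PySem.List.pyRange (k : Int) (cs.length : Int) (k : Int)).foldl
        (fun (acc : List Char × List Char × Int) j =>
          if acc.2.1 = PySem.List.slice cs (some j) (some (j + (k : Int))) then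
            (acc.1, acc.2.1, acc.2.2 + 1)
          else
            (acc.1 ++ (if acc.2.2 > 1 then PySem.Int.toChars acc.2.2 ++ acc.2.1 else acc.2.1),
             PySem.List.slice cs (some j) (some (j + (k : Int))), (1 : Int)))
        (([] : List Char), PySem.List.slice cs (some 0) (some (k : Int)), (1 : Int))).1 ++
      (if ((PySem.List.pyRange (k : Int) (cs.length : Int) (k : Int)).foldl
        (fun (acc : List Char × List Char × Int) j =>
          if acc.2.1 = PySem.List.slice cs (some j) (some (j + (k : Int))) then
            (acc.1, acc.2.1, acc.2.2 + 1)
          else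
            (acc.1 ++ (if acc.2.2 > 1 then PySem.Int.toChars acc.2.2 ++ acc.2.1 else acc.2.1),
             PySem.List.slice cs (some j) (some (j + (k : Int))), (1 : Int)))
        (([] : List Char), PySem.List.slice cs (some 0) (some (k : Int)), (1 : Int))).2.2 > 1 then
        PySem.Int.toChars ((PySem.List.pyRange (k : Int) (cs.length : Int) (k : Int)).foldl
        (fun (acc : List Char × List Char × Int) j =>
          if acc.2.1 = PySem.List.slice cs (some j) (some (j + (k : Int))) then
            (acc.1, acc.2.1, acc.2.2 + 1)
          else
            (acc.1 ++ (if acc.2.2 > 1 then PySem.Int.toChars acc.2.2 ++ acc.2.1 else acc.2.1),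
             PySem.List.slice cs (some j) (some (j + (k : Int))), (1 : Int)))
        (([] : List Char), PySem.List.slice cs (some 0) (some (k : Int)), (1 : Int))).2.2 ++
        ((PySem.List.pyRange (k : Int) (cs.length : Int) (k : Int)).foldl
        (fun (acc : List Char × List Char × Int) j =>
          if acc.2.1 = PySem.List.slice cs (some j) (some (j + (k : Int))) then
            (acc.1, acc.2.1, acc.2.2 + 1)
          else
            (acc.1 ++ (if acc.2.2 > 1 then PySem.Int.toChars acc.2.2 ++ acc.2.1 else acc.2.1),
             PySem.List.slice cs (some j) (some (j + (k : Int))), (1 : Int)))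
        (([] : List Char), PySem.List.slice cs (some 0) (some (k : Int)), (1 : Int))).2.1
       else ((PySem.List.pyRange (k : Int) (cs.length : Int) (k : Int)).foldl
        (fun (acc : List Char × List Char × Int) j =>
          if acc.2.1 = PySem.List.slice cs (some j) (some (j + (k : Int))) then
            (acc.1, acc.2.1, acc.2.2 + 1)
          else
            (acc.1 ++ (if acc.2.2 > 1 then PySem.Int.toChars acc.2.2 ++ acc.2.1 else acc.2.1),
             PySem.List.slice cs (some j) (some (j + (k : Int))), (1 : Int)))
        (([] : List Char), PySem.List.slice cs (some 0) (some (k : Int)), (1 : Int))).2.1)).length : Int)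
    = rleLen0 (chunksFrom cs k hk0 0) := by
  have hlam : (fun (acc : List Char × List Char × Int) j =>
          if acc.2.1 = PySem.List.slice cs (some j) (some (j + (k : Int))) then
            (acc.1, acc.2.1, acc.2.2 + 1)
          else
            (acc.1 ++ (if acc.2.2 > 1 then PySem.Int.toChars acc.2.2 ++ acc.2.1 else acc.2.1),
             PySem.List.slice cs (some j) (some (j + (k : Int))), (1 : Int)))
      = (fun (p : List Char × List Char × Int) j =>
          gA p (PySem.List.slice cs (some j) (some (j + (k : Int))))) := rfl
  rw [hlam, ← List.foldl_map, map_pyRange_chunks cs k hk0 k, foldA_len]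
  conv_rhs => rw [chunksFrom, if_pos h0, rleLen0_cons]
  norm_num

-- B's per-step total equals the same RLE length
theorem stepB_val (cs : List Char) (k : Nat) (hk0 : 0 < k) (h0 : 0 < cs.length) :
    (loopB cs k (misBuild cs k (cs.length + 1) k (List.replicate (cs.length + 1) 0)) (cs.length + 1) k (0, 1)).1
      + (((if cs.length % k ≠ 0 then cs.length % k else k) : Nat) : Int)
      + (if (loopB cs k (misBuild cs k (cs.length + 1) k (List.replicate (cs.length + 1) 0)) (cs.length + 1) k (0, 1)).2 > 1 then
          ((PySem.Int.toChars (loopB cs k (misBuild cs k (cs.length + 1) k (List.replicate (cs.length + 1) 0)) (cs.length + 1) k (0, 1)).2).length : Int)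
         else 0)
    = rleLen0 (chunksFrom cs k hk0 0) := by
  have hmis : ∀ i, i ≤ cs.length →
      (misBuild cs k (cs.length + 1) k (List.replicate (cs.length + 1) 0)).getD i 0 = mismatchCnt cs k i := by
    apply misBuild_getD cs k (cs.length + 1) k (List.replicate (cs.length + 1) 0) (by omega) (le_refl k)
      (by simp)
    intro i
    have hrep : (List.replicate (cs.length + 1) (0 : Int)).getD i 0 = 0 := by
      rw [List.getD_eq_getElem?_getD, List.getElem?_replicate]
      split_ifs <;> simp
    rw [hrep]
    by_cases hi : i ≤ k
    · rw [if_pos hi, mismatchCnt_le cs k i hi]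
    · rw [if_neg hi]
  have := loopB_rle cs k hk0 (misBuild cs k (cs.length + 1) k (List.replicate (cs.length + 1) 0)) hmis
    (cs.length + 1) k (0, 1) (by omega) (le_refl k) (dvd_refl k) (by omega)
  rw [this]
  conv_rhs => rw [chunksFrom, if_pos h0, rleLen0_cons]
  have : ((k - k : Nat) : Int) = ((0 : Nat) : Int) := by norm_num
  rw [this]
  ring

-- ===== VERDICT (by name: the statement is the Claim_ definition above) =====
theorem solution_spec : Claim_equal_solution := by
  intro s _
  unfold Spec_solution solution solution_alt
  simp only []
  apply PySem.List.foldl_congr_mem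
  intro acc step hmem
  rw [PySem.List.mem_pyRange_one] at hmem
  obtain ⟨k, hk⟩ := Int.eq_ofNat_of_zero_le (by omega : (0 : Int) ≤ step)
  subst hk
  have hk0 : 0 < k := by exact_mod_cast hmem.1
  have hkn : 0 < s.toList.length := by
    have h2 := hmem.2
    rw [PySem.Int.floordiv_eq_ediv_of_pos (by omega : (0 : Int) < 2)] at h2
    omega
  simp only [Int.toNat_natCast]
  rw [if_pos hk0]
  rw [stepB_val s.toList k hk0 hkn]
  rw [stepA_val s.toList k hk0 hkn]
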